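-- pv_equiv track=rewrite | github.com/jrodriguezgar/FormuLite | shortfx/fxNumeric/statistics_functions.py | bfill
-- ===== SOURCE A (Python) =====
-- from typing import Any, Dict, List, Optional, Tuple, Union
--
-- def bfill(data: List[Any]) -> List[Any]:
--     """Backward-fills None values with the next non-None value.
--
--     Args:
--         data: A list that may contain None values.
--
--     Returns:
--         A new list with None values replaced by the next non-None value.
--
--     Raises:
--         TypeError: If input is not a list.
--
--     Example:
--         >>> bfill([None, None, 3, None, 5])
--         [3, 3, 3, 5, 5]
--
--     Complexity: O(n)
--     """
--     if not isinstance(data, list):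
--         raise TypeError("Input 'data' must be a list.")
--
--     result: List[Any] = list(data)
--     next_valid = None
--
--     for i in range(len(result) - 1, -1, -1):
--
--         if result[i] is not None:
--             next_valid = result[i]
--         else:
--             result[i] = next_valid
--
--     return result
-- ===== SOURCE B (Python) =====
-- def bfill(data):
--     """Backward-fills None values with the next non-None value (single forward
--     pass with a pending-None counter; builds a new list, no copy of the input)."""
--     if not isinstance(data, list):
--         raise TypeError("Input 'data' must be a list.")
--     out = []
--     pending = 0
--     for x in data:
--         if x is None:
--             pending += 1
--         else:
--             out.extend([x] * pending)
--             out.append(x)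
--             pending = 0
--     out.extend([None] * pending)
--     return out
-- ===== Notes on version B (the rewrite author's own statement) =====
-- stated objective: alternative
-- what changed: Replaced the backward scan over a mutated copy of the input (carrying the last seen value right-to-left) with a single forward pass that counts pending Nones and flushes them as copies of the next non-None value while building a fresh output list.
import Mathlib
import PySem

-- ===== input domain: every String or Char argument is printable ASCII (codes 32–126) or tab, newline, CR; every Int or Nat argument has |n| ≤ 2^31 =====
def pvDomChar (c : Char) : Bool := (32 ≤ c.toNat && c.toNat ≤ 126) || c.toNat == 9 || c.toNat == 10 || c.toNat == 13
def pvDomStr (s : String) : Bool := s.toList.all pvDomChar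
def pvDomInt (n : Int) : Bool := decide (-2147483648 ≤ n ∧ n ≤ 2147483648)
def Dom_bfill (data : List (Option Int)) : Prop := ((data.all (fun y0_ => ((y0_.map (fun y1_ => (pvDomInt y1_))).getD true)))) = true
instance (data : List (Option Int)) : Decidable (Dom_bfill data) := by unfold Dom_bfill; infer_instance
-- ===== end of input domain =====

-- B replaces A's backward scan over a mutated copy with a forward pass keeping a
-- pending-None counter that is flushed at each non-None value (alternative decomposition, return value only).

-- ===== PORT A =====
-- A iterates i = len-1 … 0 over a copy of data, carrying next_valid; a position is
-- kept if non-None (updating next_valid) else overwritten with next_valid.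
-- Right-to-left iteration is rendered as structural recursion that resolves the tail first;
-- the pair returns (result list, next_valid after processing this suffix).
def bfillGoA : List (Option Int) → List (Option Int) × Option Int
  | [] => ([], none)
  | x :: xs =>
    let r := bfillGoA xs
    match x with
    | some v => (some v :: r.1, some v)
    | none => (r.2 :: r.1, r.2)

def bfill (data : List (Option Int)) : List (Option Int) := (bfillGoA data).1

-- ===== PORT B =====
-- forward fold, state = (out built so far, count of pending Nones); trailing pending
-- Nones are appended as None at the end.
def bfillStepB (st : List (Option Int) × Nat) (x : Option Int) : List (Option Int) × Nat :=
  match x with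
  | none => (st.1, st.2 + 1)
  | some v => (st.1 ++ List.replicate st.2 (some v) ++ [some v], 0)

def bfill_alt (data : List (Option Int)) : List (Option Int) :=
  let st := data.foldl bfillStepB ([], 0)
  st.1 ++ List.replicate st.2 none

-- ===== PRECONDITION & SPEC =====
def Spec_bfill (data : List (Option Int)) (out : List (Option Int)) : Prop := out = bfill_alt data
instance (data : List (Option Int)) (out : List (Option Int)) : Decidable (Spec_bfill data out) := by unfold Spec_bfill; infer_instance

-- ===== CLAIM (what is proved, stated in full; the proofs are below) =====
def Claim_equal_bfill : Prop := ∀ (data : List (Option Int)), Dom_bfill data → Spec_bfill data (bfill data)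

-- ===== LEMMAS AND PROOFS =====

-- Invariant: running B's fold from (out, p) on data and finishing yields
-- out, then p copies of the backward-fill value of data, then A's result for data.
theorem bfill_fold_inv (data : List (Option Int)) :
    ∀ (out : List (Option Int)) (p : Nat),
      (let st := data.foldl bfillStepB (out, p); st.1 ++ List.replicate st.2 none)
        = out ++ List.replicate p (bfillGoA data).2 ++ (bfillGoA data).1 := by
  induction data with
  | nil => intro out p; simp [bfillGoA]
  | cons x xs ih =>
    intro out p
    cases x with
    | none =>
      simp only [List.foldl_cons, bfillStepB, bfillGoA]
      rw [ih out (p + 1)]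
      simp [List.replicate_succ']
    | some v =>
      simp only [List.foldl_cons, bfillStepB, bfillGoA]
      rw [ih (out ++ List.replicate p (some v) ++ [some v]) 0]
      simp

-- ===== VERDICT (by name: the statement is the Claim_ definition above) =====
theorem bfill_spec : Claim_equal_bfill := by
  intro data _
  show bfill data = bfill_alt data
  unfold bfill bfill_alt
  rw [bfill_fold_inv data [] 0]
  simp
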